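-- pv_equiv track=rewrite | github.com/smallfishabc/interaction_map | contactmapplot.py | seq_color
-- ===== SOURCE A (Python) =====
-- def seq_color(seq):
--     negacharged = []
--     posicharged = []
--     aromatic = []
--     for index, i in enumerate(seq):
--         if i in ['D', 'E']:
--             negacharged.append(index)
--         elif i in ['R', 'K', 'H']:
--             posicharged.append(index)
--         elif i in ['F', 'Y', 'W']:
--             aromatic.append(index)
--     return negacharged, posicharged, aromatic
-- ===== SOURCE B (Python) =====
-- def seq_color(seq):
--     negacharged = [index for index, i in enumerate(seq) if i in ['D', 'E']]
--     posicharged = [index for index, i in enumerate(seq) if i in ['R', 'K', 'H']]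
--     aromatic = [index for index, i in enumerate(seq) if i in ['F', 'Y', 'W']]
--     return negacharged, posicharged, aromatic
-- ===== Notes on version B (the rewrite author's own statement) =====
-- stated objective: idiomatic
-- what changed: Replaces the single stateful branching loop over three accumulators with three independent list comprehensions, one pass of enumerate(seq) per category.
import Mathlib
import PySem

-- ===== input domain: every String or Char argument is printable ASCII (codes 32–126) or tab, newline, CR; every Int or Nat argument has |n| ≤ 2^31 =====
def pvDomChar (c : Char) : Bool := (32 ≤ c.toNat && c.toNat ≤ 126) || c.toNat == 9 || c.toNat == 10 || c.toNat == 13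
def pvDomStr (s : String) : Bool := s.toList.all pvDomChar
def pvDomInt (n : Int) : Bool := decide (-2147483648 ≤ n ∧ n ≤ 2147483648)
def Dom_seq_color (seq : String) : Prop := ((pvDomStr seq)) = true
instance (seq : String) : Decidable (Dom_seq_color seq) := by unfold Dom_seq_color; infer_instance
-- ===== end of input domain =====

-- B replaces A's single branching loop with three independent per-category comprehensions (idiomatic; same behaviour).

-- ===== PORT A =====
-- literal transliteration of A: one fold over enumerate(seq) with three accumulators and an if/elif/elif chain
def seq_color (seq : String) : List Int × List Int × List Int :=
  (PySem.List.enumerate seq.toList).foldl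
    (fun st p =>
      if p.2 ∈ ['D', 'E'] then (st.1 ++ [p.1], st.2.1, st.2.2)
      else if p.2 ∈ ['R', 'K', 'H'] then (st.1, st.2.1 ++ [p.1], st.2.2)
      else if p.2 ∈ ['F', 'Y', 'W'] then (st.1, st.2.1, st.2.2 ++ [p.1])
      else st)
    ([], [], [])

-- ===== PORT B =====
-- literal transliteration of B: three independent comprehensions over enumerate(seq)
def seq_color_alt (seq : String) : List Int × List Int × List Int :=
  (((PySem.List.enumerate seq.toList).filter (fun p => p.2 ∈ ['D', 'E'])).map (·.1),
   ((PySem.List.enumerate seq.toList).filter (fun p => p.2 ∈ ['R', 'K', 'H'])).map (·.1),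
   ((PySem.List.enumerate seq.toList).filter (fun p => p.2 ∈ ['F', 'Y', 'W'])).map (·.1))

-- ===== PRECONDITION & SPEC =====
def Spec_seq_color (seq : String) (out : List Int × List Int × List Int) : Prop := out = seq_color_alt seq
instance (seq : String) (out : List Int × List Int × List Int) : Decidable (Spec_seq_color seq out) := by unfold Spec_seq_color; infer_instance

-- ===== CLAIM (what is proved, stated in full; the proofs are below) =====
def Claim_equal_seq_color : Prop := ∀ (seq : String), Dom_seq_color seq → Spec_seq_color seq (seq_color seq)

-- ===== LEMMAS AND PROOFS =====

theorem seq_color_fold_eq (l : List (Int × Char)) (a b c : List Int) :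
    l.foldl
      (fun st p =>
        if p.2 ∈ ['D', 'E'] then (st.1 ++ [p.1], st.2.1, st.2.2)
        else if p.2 ∈ ['R', 'K', 'H'] then (st.1, st.2.1 ++ [p.1], st.2.2)
        else if p.2 ∈ ['F', 'Y', 'W'] then (st.1, st.2.1, st.2.2 ++ [p.1])
        else st)
      (a, b, c)
    = (a ++ (l.filter (fun p => p.2 ∈ ['D', 'E'])).map (·.1),
       b ++ (l.filter (fun p => p.2 ∈ ['R', 'K', 'H'])).map (·.1),
       c ++ (l.filter (fun p => p.2 ∈ ['F', 'Y', 'W'])).map (·.1)) := by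
  induction l generalizing a b c with
  | nil => simp
  | cons p t ih =>
    obtain ⟨i, ch⟩ := p
    by_cases h1 : ch = 'D' ∨ ch = 'E'
    · rcases h1 with rfl | rfl <;>
      · rw [List.foldl_cons]
        show List.foldl _ (a ++ [i], b, c) t = _
        rw [ih]
        simp [List.filter_cons]
    · by_cases h2 : ch = 'R' ∨ ch = 'K' ∨ ch = 'H'
      · rcases h2 with rfl | rfl | rfl <;>
        · rw [List.foldl_cons]
          show List.foldl _ (a, b ++ [i], c) t = _
          rw [ih]
          simp [List.filter_cons]
      · by_cases h3 : ch = 'F' ∨ ch = 'Y' ∨ ch = 'W'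
        · rcases h3 with rfl | rfl | rfl <;>
          · rw [List.foldl_cons]
            show List.foldl _ (a, b, c ++ [i]) t = _
            rw [ih]
            simp [List.filter_cons]
        · rw [List.foldl_cons]
          have e1 : ((i, ch).2 ∈ ['D', 'E']) = False := by simp [h1]
          have e2 : ((i, ch).2 ∈ ['R', 'K', 'H']) = False := by simp; tauto
          have e3 : ((i, ch).2 ∈ ['F', 'Y', 'W']) = False := by simp; tauto
          simp only [e1, e2, e3, if_false]
          rw [ih]
          simp [List.filter_cons, h1, h2, h3]

-- ===== VERDICT (by name: the statement is the Claim_ definition above) =====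
theorem seq_color_spec : Claim_equal_seq_color := by
  intro seq _
  unfold Spec_seq_color seq_color seq_color_alt
  rw [seq_color_fold_eq]
  simp
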